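-- pv_equiv track=rewrite | github.com/arieldelplata/proyectos | parser/afds.py | afd_operation
-- ===== SOURCE A (Python) =====
-- def afd_operation(cadena):
--     estados_sin_trampa = [0, 1]
--     estados_aceptados = [1]
--     estados_no_aceptados = [0]
--     estado_trampa = 't'
--     estado = 0
--     caracteres = ['+', '-']
--     delta = {
--     0: {'+': 1, '-': 1},
--     1: {'+': 't', '-': 't'},
--     't': {'+': 't', '-': 't'}
--     }
--
--     for caracter in cadena:
--         if (estado in estados_sin_trampa) and (caracter in caracteres):
--             estado = delta[estado][caracter]
--         elif (estado == 't') or not(caracter in caracteres):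
--             estado = 't'
--             break
--
--     if estado in estados_aceptados:
--         estado_final = 'aceptado'
--     elif estado in estados_no_aceptados:
--         estado_final = 'no aceptado'
--     elif estado == estado_trampa:
--         estado_final = 'trampa'
--
--     return estado_final
-- ===== SOURCE B (Python) =====
-- def afd_operation(cadena):
--     if len(cadena) == 0:
--         return 'no aceptado'
--     if len(cadena) == 1 and cadena[0] in ('+', '-'):
--         return 'aceptado'
--     return 'trampa'
-- ===== Notes on version B (the rewrite author's own statement) =====
-- stated objective: simpler
-- what changed: Replaced the DFA loop with transition table by a direct closed-form three-way classification on the string's length and first character.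
import Mathlib
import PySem

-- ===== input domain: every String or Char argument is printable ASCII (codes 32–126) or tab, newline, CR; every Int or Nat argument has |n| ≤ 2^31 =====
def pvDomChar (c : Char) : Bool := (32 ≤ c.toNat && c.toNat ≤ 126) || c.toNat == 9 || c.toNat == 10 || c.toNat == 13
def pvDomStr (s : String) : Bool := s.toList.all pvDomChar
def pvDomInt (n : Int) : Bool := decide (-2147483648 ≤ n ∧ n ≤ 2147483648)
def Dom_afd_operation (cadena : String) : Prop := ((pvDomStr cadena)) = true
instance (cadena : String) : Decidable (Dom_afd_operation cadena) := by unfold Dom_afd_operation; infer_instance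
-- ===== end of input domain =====

-- B replaces A's DFA loop and transition table by a closed-form classification (simpler).

-- ===== PORT A =====
-- Python's `estado` takes values 0, 1 or 't'; modelled by a three-constructor type.
inductive AfdSt : Type
  | s0 | s1 | st
deriving DecidableEq

-- the `delta` dict: delta[0][c] = 1 and delta[1][c] = delta['t'][c] = 't' for c in {'+','-'};
-- it is only consulted with estado ∈ {0,1} and caracter ∈ {'+','-'}.
def afdDelta : AfdSt → Char → AfdSt
  | .s0, _ => .s1
  | _, _ => .st

-- the for-loop: the second branch sets estado = 't' and breaks; if neither branch fires the loop continues.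
def afdGo : AfdSt → List Char → AfdSt
  | e, [] => e
  | e, c :: cs =>
    if (e = .s0 ∨ e = .s1) ∧ (c = '+' ∨ c = '-') then afdGo (afdDelta e c) cs
    else if e = .st ∨ ¬(c = '+' ∨ c = '-') then .st
    else afdGo e cs

def afd_operation (cadena : String) : String :=
  let estado := afdGo .s0 cadena.toList
  if estado = .s1 then "aceptado"
  else if estado = .s0 then "no aceptado"
  else "trampa"

-- ===== PORT B =====
def afd_operation_alt (cadena : String) : String :=
  let l := cadena.toList
  if l.length = 0 then "no aceptado"
  else if l.length = 1 ∧ (l.headD ' ' = '+' ∨ l.headD ' ' = '-') then "aceptado"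
  else "trampa"

-- ===== PRECONDITION & SPEC =====
def Spec_afd_operation (cadena : String) (out : String) : Prop := out = afd_operation_alt cadena
instance (cadena : String) (out : String) : Decidable (Spec_afd_operation cadena out) := by unfold Spec_afd_operation; infer_instance

-- ===== CLAIM (what is proved, stated in full; the proofs are below) =====
def Claim_equal_afd_operation : Prop := ∀ (cadena : String), Dom_afd_operation cadena → Spec_afd_operation cadena (afd_operation cadena)

-- ===== LEMMAS AND PROOFS =====
theorem afdGo_st (cs : List Char) : afdGo .st cs = .st := by
  cases cs with
  | nil => rfl
  | cons c cs => simp [afdGo]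

-- ===== VERDICT (by name: the statement is the Claim_ definition above) =====
theorem afd_operation_spec : Claim_equal_afd_operation := by
  intro cadena _
  unfold Spec_afd_operation afd_operation afd_operation_alt
  match h : cadena.toList with
  | [] => rfl
  | [c] =>
      by_cases hc : c = '+' ∨ c = '-' <;> simp [afdGo, hc, afdDelta]
  | c :: d :: cs =>
      by_cases hc : c = '+' ∨ c = '-'
      · by_cases hd : d = '+' ∨ d = '-' <;>
          simp [afdGo, hc, hd, afdDelta, afdGo_st]
      · simp [afdGo, hc]
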